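-- pv_equiv track=rewrite | github.com/yeoedward/Robust-Fill | nn.py | _split_flatten_examples
-- ===== SOURCE A (Python) =====
-- def _split_flatten_examples(batch):
--     input_batch = [
--         input_sequence
--         for examples in batch
--         for input_sequence, _ in examples
--     ]
--     output_batch = [
--         output_sequence
--         for examples in batch
--         for _, output_sequence in examples
--     ]
--     return input_batch, output_batch
-- ===== SOURCE B (Python) =====
-- def _split_flatten_examples(batch):
--     flat = [pair for examples in batch for pair in examples]
--     if flat:
--         input_batch, output_batch = map(list, zip(*flat))
--     else:
--         input_batch, output_batch = [], []
--     return input_batch, output_batch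
-- ===== Notes on version B (the rewrite author's own statement) =====
-- stated objective: simpler
-- what changed: B flattens the batch once into a single list of pairs and unzips it with zip(*flat), instead of A's two separate comprehension passes projecting first and second components.
import Mathlib
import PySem

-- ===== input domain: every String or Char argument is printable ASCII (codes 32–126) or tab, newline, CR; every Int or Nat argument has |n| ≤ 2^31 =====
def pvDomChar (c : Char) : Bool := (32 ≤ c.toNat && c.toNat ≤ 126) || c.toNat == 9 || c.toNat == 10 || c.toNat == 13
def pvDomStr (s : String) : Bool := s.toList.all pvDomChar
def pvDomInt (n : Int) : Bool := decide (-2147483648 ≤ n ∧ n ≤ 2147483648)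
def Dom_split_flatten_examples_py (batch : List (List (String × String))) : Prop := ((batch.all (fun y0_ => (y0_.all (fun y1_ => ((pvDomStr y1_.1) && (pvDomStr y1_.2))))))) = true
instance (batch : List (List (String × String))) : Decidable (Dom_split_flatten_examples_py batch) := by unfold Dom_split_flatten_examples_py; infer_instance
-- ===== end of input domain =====

-- B flattens the batch once and unzips the flat pair list; same return value, one pass over the data instead of A's two projection passes.

-- ===== PORT A =====
def split_flatten_examples_py (batch : List (List (String × String))) : List String × List String :=
  let input_batch := batch.flatMap (fun examples => examples.map (fun p => p.1))
  let output_batch := batch.flatMap (fun examples => examples.map (fun p => p.2))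
  (input_batch, output_batch)

-- ===== PORT B =====
def split_flatten_examples_py_alt (batch : List (List (String × String))) : List String × List String :=
  let flat := batch.flatMap (fun examples => examples)
  match flat with
  | [] => ([], [])
  | _ => flat.unzip

-- ===== PRECONDITION & SPEC =====
def Spec_split_flatten_examples_py (batch : List (List (String × String))) (out : List String × List String) : Prop := out = split_flatten_examples_py_alt batch
instance (batch : List (List (String × String))) (out : List String × List String) : Decidable (Spec_split_flatten_examples_py batch out) := by unfold Spec_split_flatten_examples_py; infer_instance

-- ===== CLAIM (what is proved, stated in full; the proofs are below) =====
def Claim_equal_split_flatten_examples_py : Prop := ∀ (batch : List (List (String × String))), Dom_split_flatten_examples_py batch → Spec_split_flatten_examples_py batch (split_flatten_examples_py batch)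

-- ===== LEMMAS AND PROOFS =====
theorem split_flatten_unzip (batch : List (List (String × String))) :
    split_flatten_examples_py batch = (batch.flatMap (fun e => e)).unzip := by
  simp only [split_flatten_examples_py, List.unzip_eq_map, List.flatMap_def, List.map_flatten, List.map_map]
  rfl

-- ===== VERDICT (by name: the statement is the Claim_ definition above) =====
theorem split_flatten_examples_py_spec : Claim_equal_split_flatten_examples_py := by
  intro batch _
  unfold Spec_split_flatten_examples_py split_flatten_examples_py_alt
  cases h : batch.flatMap (fun e => e) with
  | nil => simp [split_flatten_unzip, h]
  | cons a l => simp [split_flatten_unzip, h]
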